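-- pv_equiv track=rewrite | github.com/Anuragdhawade29/MediBot | medibot.py | get_dynamic_suggestions_from_symptoms
-- ===== SOURCE A (Python) =====
-- def get_dynamic_suggestions_from_symptoms(symptoms):
--     symptom_set = set(symptoms or [])
--     suggestions = []
--     if "Fever" in symptom_set:
--         suggestions.extend(
--             [
--                 "When should fever become a concern?",
--                 "What infections commonly cause fever?",
--             ]
--         )
--     if "Cough or cold" in symptom_set:
--         suggestions.extend(
--             [
--                 "Could this be flu or viral infection?",
--                 "When is cough considered serious?",
--             ]
--         )
--     if "Breathing difficulty" in symptom_set: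
--         suggestions.extend(
--             [
--                 "When should I go to emergency for breathing difficulty?",
--                 "What tests are used for breathlessness?",
--             ]
--         )
--     if "Nausea or vomiting" in symptom_set:
--         suggestions.extend(
--             [
--                 "How to prevent dehydration in vomiting?",
--                 "When does vomiting need urgent care?",
--             ]
--         )
--     # Deduplicate and limit.
--     unique = []
--     for item in suggestions:
--         if item not in unique:
--             unique.append(item)
--     return unique[:6]
-- ===== SOURCE B (Python) =====
-- KEYS = ["Fever", "Cough or cold", "Breathing difficulty", "Nausea or vomiting"]
-- BANK = [
--     ["When should fever become a concern?",
--      "What infections commonly cause fever?"],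
--     ["Could this be flu or viral infection?",
--      "When is cough considered serious?"],
--     ["When should I go to emergency for breathing difficulty?",
--      "What tests are used for breathlessness?"],
--     ["How to prevent dehydration in vomiting?",
--      "When does vomiting need urgent care?"],
-- ]
--
--
-- def _answers(mask):
--     out = []
--     for i in range(4):
--         if (mask >> i) & 1:
--             out += BANK[i]
--     return out[:6]
--
--
-- # All 16 possible answers, precomputed once at module load.
-- RESULTS = [_answers(m) for m in range(16)]
--
--
-- def get_dynamic_suggestions_from_symptoms(symptoms):
--     present = set(symptoms or [])
--     mask = 0
--     for i, key in enumerate(KEYS):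
--         if key in present:
--             mask |= 1 << i
--     return RESULTS[mask]
-- ===== Notes on version B (the rewrite author's own statement) =====
-- stated objective: alternative
-- what changed: B encodes which of the four symptoms are present as a 4-bit mask and returns the answer from a table of all 16 possible results precomputed once at module load, instead of A's per-call branch-and-concatenate plus quadratic dedup pass.
import Mathlib
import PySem

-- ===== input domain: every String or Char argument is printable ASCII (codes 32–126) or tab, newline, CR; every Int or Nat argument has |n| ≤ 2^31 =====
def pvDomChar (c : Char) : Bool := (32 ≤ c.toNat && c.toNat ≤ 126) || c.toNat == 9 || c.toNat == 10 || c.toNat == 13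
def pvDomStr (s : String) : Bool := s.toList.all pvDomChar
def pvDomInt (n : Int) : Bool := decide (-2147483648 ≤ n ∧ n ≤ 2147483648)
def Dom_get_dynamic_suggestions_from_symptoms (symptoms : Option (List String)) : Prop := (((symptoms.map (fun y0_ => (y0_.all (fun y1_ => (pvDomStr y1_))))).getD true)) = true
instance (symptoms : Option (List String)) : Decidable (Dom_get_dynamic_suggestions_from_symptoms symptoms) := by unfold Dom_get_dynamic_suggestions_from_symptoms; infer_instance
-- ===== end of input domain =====

-- B encodes the present symptoms as a 4-bit mask and looks the answer up in a table of
-- all 16 precomputed results, instead of A's per-call branching and dedup; objective: alternative.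

-- ===== PORT A =====
def get_dynamic_suggestions_from_symptoms (symptoms : Option (List String)) : List String :=
  let symptom_set : PySem.Set String := PySem.Set.ofList (symptoms.getD [])
  let suggestions : List String := []
  let suggestions := if PySem.Set.contains symptom_set "Fever" then
      suggestions ++ ["When should fever become a concern?",
                      "What infections commonly cause fever?"] else suggestions
  let suggestions := if PySem.Set.contains symptom_set "Cough or cold" then
      suggestions ++ ["Could this be flu or viral infection?",
                      "When is cough considered serious?"] else suggestions
  let suggestions := if PySem.Set.contains symptom_set "Breathing difficulty" then
      suggestions ++ ["When should I go to emergency for breathing difficulty?",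
                      "What tests are used for breathlessness?"] else suggestions
  let suggestions := if PySem.Set.contains symptom_set "Nausea or vomiting" then
      suggestions ++ ["How to prevent dehydration in vomiting?",
                      "When does vomiting need urgent care?"] else suggestions
  -- Deduplicate and limit.
  let unique := suggestions.foldl (fun u item => if u.contains item then u else u ++ [item]) []
  PySem.List.slice unique none (some 6)

-- ===== PORT B =====
def pvKeys : List String :=
  ["Fever", "Cough or cold", "Breathing difficulty", "Nausea or vomiting"]

def pvBank : List (List String) :=
  [["When should fever become a concern?",
    "What infections commonly cause fever?"],
   ["Could this be flu or viral infection?",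
    "When is cough considered serious?"],
   ["When should I go to emergency for breathing difficulty?",
    "What tests are used for breathlessness?"],
   ["How to prevent dehydration in vomiting?",
    "When does vomiting need urgent care?"]]

def pvAnswers (mask : Nat) : List String :=
  let out := (List.range 4).foldl
    (fun out i => if (mask >>> i) &&& 1 = 1 then out ++ (pvBank.getD i []) else out) []
  out.take 6

-- All 16 possible answers, precomputed once.
def pvResults : List (List String) := (List.range 16).map pvAnswers

def get_dynamic_suggestions_from_symptoms_alt (symptoms : Option (List String)) : List String :=
  let present : PySem.Set String := PySem.Set.ofList (symptoms.getD [])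
  let mask := ((PySem.List.enumerate pvKeys 0).foldl
    (fun mask p => if PySem.Set.contains present p.2 then mask ||| (1 <<< p.1.toNat) else mask) 0)
  pvResults.getD mask []

-- ===== PRECONDITION & SPEC =====
def Spec_get_dynamic_suggestions_from_symptoms (symptoms : Option (List String)) (out : List String) : Prop := out = get_dynamic_suggestions_from_symptoms_alt symptoms
instance (symptoms : Option (List String)) (out : List String) : Decidable (Spec_get_dynamic_suggestions_from_symptoms symptoms out) := by unfold Spec_get_dynamic_suggestions_from_symptoms; infer_instance

-- ===== CLAIM =====
def Claim_equal_get_dynamic_suggestions_from_symptoms : Prop := ∀ (symptoms : Option (List String)), Dom_get_dynamic_suggestions_from_symptoms symptoms → Spec_get_dynamic_suggestions_from_symptoms symptoms (get_dynamic_suggestions_from_symptoms symptoms)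

-- ===== LEMMAS AND PROOFS =====

-- ===== VERDICT =====
theorem get_dynamic_suggestions_from_symptoms_spec : Claim_equal_get_dynamic_suggestions_from_symptoms := by
  intro symptoms _
  unfold Spec_get_dynamic_suggestions_from_symptoms
  unfold get_dynamic_suggestions_from_symptoms get_dynamic_suggestions_from_symptoms_alt
  by_cases h1 : "Fever" ∈ symptoms.getD [] <;>
  by_cases h2 : "Cough or cold" ∈ symptoms.getD [] <;>
  by_cases h3 : "Breathing difficulty" ∈ symptoms.getD [] <;>
  by_cases h4 : "Nausea or vomiting" ∈ symptoms.getD [] <;>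
    simp [pvResults, pvAnswers, pvBank, pvKeys, List.range_succ, PySem.List.enumerate,
          PySem.List.slice, h1, h2, h3, h4]
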